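-- pv_equiv track=rewrite | github.com/CarmiF/Python_basics_class | HW2/task_3.py | ordered_subset
-- ===== SOURCE A (Python) =====
-- def return_sliced_str(str, char):
--     if char in str[0]:
--         return str[2:]
--     else:
--         return return_sliced_str(str[1:],char)
--
-- def ordered_subset(str1,str2):
--     if str2== "":
--         return True
--     if str1 == "":
--         return False
--
--     if(str2[0] in str1):
--         return ordered_subset(return_sliced_str(str1, str2[0]), str2[1:])
--     return False
-- ===== SOURCE B (Python) =====
-- def ordered_subset(str1, str2):
--     i = 0
--     n = len(str1)
--     for ch in str2:
--         while i < n and str1[i] != ch: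
--             i += 1
--         if i >= n:
--             return False
--         i += 2
--     return True
-- ===== Notes on version B (the rewrite author's own statement) =====
-- stated objective: faster
-- what changed: Replaced A's recursive slice-and-rescan (a full substring membership test plus a linear rescan and fresh slice of str1 for every char of str2) with a single iterative two-pointer scan that keeps one index into str1 and advances it past each matched char plus one.
import Mathlib
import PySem

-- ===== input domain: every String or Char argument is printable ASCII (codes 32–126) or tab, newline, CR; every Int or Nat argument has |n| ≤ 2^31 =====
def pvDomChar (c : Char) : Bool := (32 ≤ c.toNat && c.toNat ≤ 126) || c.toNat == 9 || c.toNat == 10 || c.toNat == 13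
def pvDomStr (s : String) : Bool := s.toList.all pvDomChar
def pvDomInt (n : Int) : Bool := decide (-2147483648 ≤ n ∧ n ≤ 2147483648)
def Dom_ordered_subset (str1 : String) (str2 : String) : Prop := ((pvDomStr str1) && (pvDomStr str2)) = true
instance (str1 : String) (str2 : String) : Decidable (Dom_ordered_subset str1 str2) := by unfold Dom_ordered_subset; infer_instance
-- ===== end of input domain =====

-- B replaces A's recursive slice-and-rescan (O(n·m)) with a single two-pointer
-- index scan over str1 (O(n+m)); same return value everywhere.

-- ===== PORT A =====
-- helper return_sliced_str: on [] Python would raise IndexError, but A only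
-- calls it when ch ∈ s, so that branch is unreachable; `char in str[0]` on a
-- one-char string is equality of the chars.
def pvRss (s : List Char) (ch : Char) : List Char :=
  match s with
  | [] => []
  | c :: rest => if ch == c then rest.drop 1 else pvRss rest ch

def pvOsA (s1 : List Char) (s2 : List Char) : Bool :=
  match s2 with
  | [] => true
  | c2 :: rest2 =>
    match s1 with
    | [] => false
    | _ :: _ => if c2 ∈ s1 then pvOsA (pvRss s1 c2) rest2 else false

def ordered_subset (str1 : String) (str2 : String) : Bool :=
  pvOsA str1.toList str2.toList

-- ===== PORT B =====
-- the `while i < n and str1[i] != ch` loop: returns the final index i as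
-- `some i` when it stops on a match, `none` when it runs off the end.
def pvFindIdx (s1 : List Char) (i : Nat) (ch : Char) : Option Nat :=
  if h : i < s1.length then
    if s1[i] == ch then some i else pvFindIdx s1 (i + 1) ch
  else none
termination_by s1.length - i

-- the `for ch in str2` loop carrying the index i
def pvOsB (s1 : List Char) (i : Nat) (s2 : List Char) : Bool :=
  match s2 with
  | [] => true
  | ch :: rest =>
    match pvFindIdx s1 i ch with
    | none => false
    | some j => pvOsB s1 (j + 2) rest

def ordered_subset_alt (str1 : String) (str2 : String) : Bool :=
  pvOsB str1.toList 0 str2.toList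

-- ===== PRECONDITION & SPEC =====
def Spec_ordered_subset (str1 : String) (str2 : String) (out : Bool) : Prop := out = ordered_subset_alt str1 str2
instance (str1 : String) (str2 : String) (out : Bool) : Decidable (Spec_ordered_subset str1 str2 out) := by unfold Spec_ordered_subset; infer_instance

-- ===== CLAIM (what is proved, stated in full; the proofs are below) =====
def Claim_equal_ordered_subset : Prop := ∀ (str1 : String) (str2 : String), Dom_ordered_subset str1 str2 → Spec_ordered_subset str1 str2 (ordered_subset str1 str2)

-- ===== LEMMAS AND PROOFS =====

theorem pvFindIdx_none {s1 : List Char} {i : Nat} {ch : Char}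
    (h : pvFindIdx s1 i ch = none) : ch ∉ s1.drop i := by
  fun_induction pvFindIdx s1 i ch with
  | case1 i hlt heq => exact absurd h (by simp)
  | case2 i hlt hne ih =>
    have hdrop : s1.drop i = s1[i] :: s1.drop (i + 1) :=
      List.drop_eq_getElem_cons hlt
    rw [hdrop]
    intro hmem
    rcases List.mem_cons.mp hmem with h1 | h2
    · exact hne (by simp [h1])
    · exact ih h h2
  | case3 i hlt =>
    simp [List.drop_eq_nil_of_le (by omega : s1.length ≤ i)]

theorem pvFindIdx_some {s1 : List Char} {i : Nat} {ch : Char} {j : Nat}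
    (h : pvFindIdx s1 i ch = some j) :
    ch ∈ s1.drop i ∧ pvRss (s1.drop i) ch = s1.drop (j + 2) := by
  fun_induction pvFindIdx s1 i ch with
  | case1 i hlt heq =>
    obtain rfl : i = j := by simpa using h
    have hch : ch = s1[i] := ((beq_iff_eq).mp heq).symm
    have hdrop : s1.drop i = s1[i] :: s1.drop (i + 1) :=
      List.drop_eq_getElem_cons hlt
    refine ⟨by rw [hdrop]; exact List.mem_cons.mpr (Or.inl hch), ?_⟩
    rw [hdrop, pvRss]
    rw [if_pos (by simp [hch])]
    rw [List.drop_drop]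
  | case2 i hlt hne ih =>
    obtain ⟨hmem, hrss⟩ := ih h
    have hdrop : s1.drop i = s1[i] :: s1.drop (i + 1) :=
      List.drop_eq_getElem_cons hlt
    refine ⟨by rw [hdrop]; exact List.mem_cons.mpr (Or.inr hmem), ?_⟩
    rw [hdrop, pvRss]
    have hb : (ch == s1[i]) = false := by
      simp only [beq_eq_false_iff_ne, ne_eq]
      intro hc; exact hne (by simp [hc])
    rw [hb]
    simpa using hrss
  | case3 i hlt => exact absurd h (by simp)

theorem pvOs_agree (s2 : List Char) :
    ∀ (s1 : List Char) (i : Nat), pvOsA (s1.drop i) s2 = pvOsB s1 i s2 := by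
  induction s2 with
  | nil => intro s1 i; simp [pvOsA, pvOsB]
  | cons ch rest ih =>
    intro s1 i
    rw [pvOsB]
    cases h : pvFindIdx s1 i ch with
    | none =>
      have hnm := pvFindIdx_none h
      cases hd : s1.drop i with
      | nil => simp [pvOsA]
      | cons c cs =>
        rw [pvOsA]
        rw [hd] at hnm
        simp [hnm]
    | some j =>
      obtain ⟨hmem, hrss⟩ := pvFindIdx_some h
      cases hd : s1.drop i with
      | nil => rw [hd] at hmem; simp at hmem
      | cons c cs =>
        rw [pvOsA]
        rw [hd] at hmem hrss
        rw [if_pos hmem, hrss]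
        exact ih s1 (j + 2)

-- ===== VERDICT (by name: the statement is the Claim_ definition above) =====
theorem ordered_subset_spec : Claim_equal_ordered_subset := by
  intro str1 str2 _
  unfold Spec_ordered_subset ordered_subset ordered_subset_alt
  simpa using pvOs_agree str2.toList str1.toList 0
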